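-- pv_equiv track=rewrite | github.com/BigOasis/Python | YoungjuLee/Week10/PGS_389479_서버_증설_횟수.py | solution
-- ===== SOURCE A (Python) =====
-- def solution(players, m, k):
--     arr = []
--     for pl in players:
--         summ = sum((arr + [1])[-k:]) * m
--         if summ > pl:
--             arr = arr + [0]
--         else:
--             add = (pl - summ) // m + 1
--             arr += [add]
--     return sum(arr)
-- ===== SOURCE B (Python) =====
-- def solution(players, m, k):
--     # Incremental sliding-window version: keeps the running sum of the last
--     # k-1 appended values instead of re-summing a slice each iteration.
--     adds = []    # values appended so far
--     s = 0        # sum of adds[start:] == sum of the last (k-1) appended values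
--     start = 0
--     total = 0
--     for pl in players:
--         cap = (s + 1) * m
--         if cap > pl:
--             a = 0
--         else:
--             a = (pl - cap) // m + 1
--         adds.append(a)
--         total += a
--         s += a
--         if len(adds) - start > k - 1:
--             s -= adds[start]   # index always in range: start <= len(adds)-1 here
--             start += 1
--     return total
-- ===== Notes on version B (the rewrite author's own statement) =====
-- stated objective: faster
-- what changed: replaces the per-iteration rebuild-and-slice-and-sum of the accumulator list (arr = arr + [...]; sum((arr+[1])[-k:])) by a single pass that maintains the running sum of the last k-1 appended values incrementally with a moving window start index and a running total
-- outside the precondition, e.g. on solution([3, 4], 2, -1): A returns 4, B returns 3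
import Mathlib
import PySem

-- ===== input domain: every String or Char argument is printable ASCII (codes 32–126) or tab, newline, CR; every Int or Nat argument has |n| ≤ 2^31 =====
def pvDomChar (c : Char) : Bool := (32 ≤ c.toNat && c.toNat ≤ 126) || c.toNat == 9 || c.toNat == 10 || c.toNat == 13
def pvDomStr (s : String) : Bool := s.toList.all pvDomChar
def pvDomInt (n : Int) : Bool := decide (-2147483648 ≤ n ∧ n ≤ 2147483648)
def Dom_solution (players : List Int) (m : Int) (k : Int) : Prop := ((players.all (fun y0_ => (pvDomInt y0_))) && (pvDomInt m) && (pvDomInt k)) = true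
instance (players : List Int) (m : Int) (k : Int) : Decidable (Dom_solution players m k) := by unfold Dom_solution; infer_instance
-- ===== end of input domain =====

-- B maintains the running sum of the last k-1 appended values incrementally (one pass)
-- instead of rebuilding the list and re-summing a slice each iteration; measured faster (asymptotic).


-- ===== PORT A =====
def solution (players : List Int) (m : Int) (k : Int) : Int :=
  (players.foldl (fun (arr : List Int) (pl : Int) =>
      let summ := (PySem.List.slice (arr ++ [1]) (some (-k)) none).sum * m
      if summ > pl then arr ++ [0]
      else arr ++ [PySem.Int.floordiv (pl - summ) m + 1]) []).sum

-- ===== PORT B =====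
-- state: (adds, s, start, total); adds[start] is always in range where it is read,
-- so the Python index adds[start] is ported as List.getD with an unread default.
def solution_alt (players : List Int) (m : Int) (k : Int) : Int :=
  (players.foldl (fun (st : List Int × Int × Nat × Int) (pl : Int) =>
      let adds := st.1
      let s := st.2.1
      let start := st.2.2.1
      let total := st.2.2.2
      let cap := (s + 1) * m
      let a := if cap > pl then 0 else PySem.Int.floordiv (pl - cap) m + 1
      let adds' := adds ++ [a]
      let total' := total + a
      let s' := s + a
      if ((adds'.length : Int) - (start : Int) > k - 1) then
        (adds', s' - adds'.getD start 0, start + 1, total')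
      else
        (adds', s', start, total')) ([], 0, 0, 0)).2.2.2

-- ===== PRECONDITION & SPEC =====
-- Pre_ excludes k ≤ 0, outside the task's natural domain (the window size must be positive;
-- A's slice (arr+[1])[-k:] then reads an accidental prefix-dependent region), and the inputs
-- where Python A raises ZeroDivisionError (m = 0 with some non-negative player count).
def Pre_solution (players : List Int) (m : Int) (k : Int) : Prop :=
  1 ≤ k ∧ (m = 0 → ∀ p ∈ players, p < 0)
instance (players : List Int) (m : Int) (k : Int) : Decidable (Pre_solution players m k) := by
  unfold Pre_solution; infer_instance
def pvWitness_solution : List Int × Int × Int := ([3, 7, 2], 2, 3)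
def Spec_solution (players : List Int) (m : Int) (k : Int) (out : Int) : Prop := out = solution_alt players m k
instance (players : List Int) (m : Int) (k : Int) (out : Int) : Decidable (Spec_solution players m k out) := by unfold Spec_solution; infer_instance

-- ===== CLAIM (what is proved, stated in full; the proofs are below) =====
def Claim_equal_solution : Prop := ∀ (players : List Int) (m : Int) (k : Int), Dom_solution players m k → Pre_solution players m k → Spec_solution players m k (solution players m k)

-- ===== LEMMAS AND PROOFS =====

-- A's summ inner value: for 1 ≤ k the slice (arr++[1])[-k:] is (last k-1 of arr) ++ [1].
lemma slice_last_window (arr : List Int) (k : Int) (hk : 1 ≤ k) :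
    (PySem.List.slice (arr ++ [1]) (some (-k)) none).sum
      = (arr.drop (arr.length - (k - 1).toNat)).sum + 1 := by
  obtain ⟨n, hn⟩ : ∃ n : Nat, k = (n : Int) + 1 := ⟨(k - 1).toNat, by omega⟩
  subst hn
  have h1 : (0 : Int) < ((n : Int) + 1) := by positivity
  have : -((n : Int) + 1) = -(((n + 1 : Nat) : Int)) := by push_cast; ring
  rw [this, PySem.List.slice_from_neg_natCast _ _ (by omega)]
  have hlen : (arr ++ [1]).length = arr.length + 1 := by simp
  have hcast : ((n : Int) + 1 - 1).toNat = n := by omega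
  rw [hlen, hcast]
  by_cases h : n + 1 ≤ arr.length + 1
  · have hd : arr.length + 1 - (n + 1) = arr.length - n := by omega
    rw [hd, List.drop_append_of_le_length (by omega)]
    simp
  · have h0 : arr.length + 1 - (n + 1) = 0 := by omega
    have h0' : arr.length - n = 0 := by omega
    rw [h0, h0']
    simp

-- main loop invariant: B's fold from a coherent state tracks A's fold.
lemma loop_eq (m k : Int) (hk : 1 ≤ k) :
    ∀ (ps : List Int) (arr : List Int) (start : Nat),
      start = arr.length - (k - 1).toNat →
      ps.foldl (fun (st : List Int × Int × Nat × Int) (pl : Int) =>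
          let adds := st.1
          let s := st.2.1
          let start := st.2.2.1
          let total := st.2.2.2
          let cap := (s + 1) * m
          let a := if cap > pl then 0 else PySem.Int.floordiv (pl - cap) m + 1
          let adds' := adds ++ [a]
          let total' := total + a
          let s' := s + a
          if ((adds'.length : Int) - (start : Int) > k - 1) then
            (adds', s' - adds'.getD start 0, start + 1, total')
          else
            (adds', s', start, total'))
        (arr, (arr.drop start).sum, start, arr.sum)
      = (let arrF := ps.foldl (fun (arr : List Int) (pl : Int) =>
            let summ := (PySem.List.slice (arr ++ [1]) (some (-k)) none).sum * m
            if summ > pl then arr ++ [0]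
            else arr ++ [PySem.Int.floordiv (pl - summ) m + 1]) arr
         (arrF, (arrF.drop (arrF.length - (k - 1).toNat)).sum,
          arrF.length - (k - 1).toNat, arrF.sum)) := by
  intro ps
  induction ps with
  | nil => intro arr start hstart; simp [hstart]
  | cons pl ps ih =>
    intro arr start hstart
    rw [List.foldl_cons, List.foldl_cons]
    set w := (k - 1).toNat with hw
    have hwk : (w : Int) = k - 1 := by omega
    -- the two branch tests coincide
    have hsumm : (PySem.List.slice (arr ++ [1]) (some (-k)) none).sum * m
        = ((arr.drop start).sum + 1) * m := by
      rw [slice_last_window arr k hk, hstart]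
    set a : Int := if ((arr.drop start).sum + 1) * m > pl then 0
        else PySem.Int.floordiv (pl - ((arr.drop start).sum + 1) * m) m + 1 with ha
    have hA : (let summ := (PySem.List.slice (arr ++ [1]) (some (-k)) none).sum * m
        if summ > pl then arr ++ [0]
        else arr ++ [PySem.Int.floordiv (pl - summ) m + 1]) = arr ++ [a] := by
      simp only [hsumm, ha]
      split_ifs <;> rfl
    rw [hA]
    -- B's step from the coherent state
    have hBstep : (let adds := arr
        let s := (arr.drop start).sum
        let start' := start
        let total := arr.sum
        let cap := (s + 1) * m
        let a' := if cap > pl then 0 else PySem.Int.floordiv (pl - cap) m + 1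
        let adds' := adds ++ [a']
        let total' := total + a'
        let s' := s + a'
        if (((adds'.length : Int) - (start' : Int)) > k - 1) then
          (adds', s' - adds'.getD start' 0, start' + 1, total')
        else
          (adds', s', start', total'))
        = ((arr ++ [a] : List Int),
           (((arr ++ [a]).drop ((arr ++ [a]).length - w)).sum,
            (arr ++ [a]).length - w, (arr ++ [a]).sum)) := by
      simp only [← ha]
      have hlen' : ((arr ++ [a]).length : Int) = (arr.length : Int) + 1 := by simp
      by_cases hc : w ≤ arr.length
      · -- window full: the pop branch fires
        have hstart' : start = arr.length - w := hstart
        have hcond : (((arr ++ [a]).length : Int) - (start : Int)) > k - 1 := by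
          rw [hlen']; omega
        rw [if_pos hcond]
        have hnew : (arr ++ [a]).length - w = start + 1 := by simp; omega
        have hdrops : (arr ++ [a]).drop start = arr.drop start ++ [a] := by
          exact List.drop_append_of_le_length (by omega)
        have hsum1 : ((arr ++ [a]).drop (start + 1)).sum
            = (arr.drop start).sum + a - (arr ++ [a]).getD start 0 := by
          have hlt : start < (arr ++ [a]).length := by simp; omega
          have hcons : (arr ++ [a]).drop start
              = (arr ++ [a])[start] :: (arr ++ [a]).drop (start + 1) :=
            List.drop_eq_getElem_cons hlt
          have hgd : (arr ++ [a]).getD start 0 = (arr ++ [a])[start] :=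
            List.getD_eq_getElem _ _ hlt
          have hs : ((arr ++ [a]).drop start).sum = (arr.drop start).sum + a := by
            rw [hdrops]; simp
          rw [hcons] at hs
          rw [List.sum_cons] at hs
          rw [hgd]
          omega
        rw [hnew]
        refine congrArg₂ Prod.mk rfl (congrArg₂ Prod.mk ?_ (congrArg₂ Prod.mk rfl ?_))
        · omega
        · simp
      · -- window not yet full: no pop
        have hstart' : start = 0 := by omega
        have hcond : ¬ ((((arr ++ [a]).length : Int) - (start : Int)) > k - 1) := by
          rw [hlen']; omega
        rw [if_neg hcond]
        have hnew : (arr ++ [a]).length - w = 0 := by simp; omega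
        rw [hnew, hstart']
        refine congrArg₂ Prod.mk rfl (congrArg₂ Prod.mk ?_ (congrArg₂ Prod.mk rfl ?_))
        · simp only [hstart'] at *
          simp
        · simp
    rw [hBstep]
    exact ih (arr ++ [a]) ((arr ++ [a]).length - w) rfl

-- ===== VERDICT (by name: the statement is the Claim_ definition above) =====
theorem solution_spec : Claim_equal_solution := by
  intro players m k _hdom hpre
  unfold Spec_solution solution solution_alt
  have h := loop_eq m k hpre.1 players [] 0 (by simp)
  have h0 : ((([] : List Int), (List.drop 0 ([] : List Int)).sum, (0 : Nat), ([] : List Int).sum))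
      = ((([] : List Int), (0 : Int), (0 : Nat), (0 : Int))) := rfl
  rw [h0] at h
  rw [h]
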